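-- pv_equiv track=rewrite | github.com/KarimGabsi/TheNetwork | Extra/upnp.py | createTCPPortDocument
-- ===== SOURCE A (Python) =====
-- def createTCPPortDocument(ip, port, description):
--     from xml.dom.minidom import Document
--
--     doc = Document()
--
--     # create the envelope element and set its attributes
--     envelope = doc.createElementNS('', 's:Envelope')
--     envelope.setAttribute('xmlns:s', 'http://schemas.xmlsoap.org/soap/envelope/')
--     envelope.setAttribute('s:encodingStyle', 'http://schemas.xmlsoap.org/soap/encoding/')
--
--     # create the body element
--     body = doc.createElementNS('', 's:Body')
--
--     # create the function element and set its attribute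
--     fn = doc.createElementNS('', 'u:AddPortMapping')
--     fn.setAttribute('xmlns:u', 'urn:schemas-upnp-org:service:WANIPConnection:1')
--
--     # setup the argument element names and values
--     # using a list of tuples to preserve order
--     arguments = [
--         ('NewExternalPort', '{0}'.format(port)),           # specify port on router
--         ('NewProtocol', 'TCP'),                            # specify protocol
--         ('NewInternalPort', '{0}'.format(port)),           # specify port on internal host
--         ('NewInternalClient', '{0}'.format(ip)),           # specify IP of internal host
--         ('NewEnabled', '1'),                               # turn mapping ON
--         ('NewPortMappingDescription', '{0}'.format(description)), # add a description
--         ('NewLeaseDuration', '0')]                         # how long should it be opened?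
--
--     # NewEnabled should be 1 by default, but better supply it.
--     # NewPortMappingDescription Can be anything you want, even an empty string.
--     # NewLeaseDuration can be any integer BUT some UPnP devices don't support it,
--     # so set it to 0 for better compatibility.
--
--     # container for created nodes
--     argument_list = []
--
--     # iterate over arguments, create nodes, create text nodes,
--     # append text nodes to nodes, and finally add the ready product
--     # to argument_list
--     for k, v in arguments:
--         tmp_node = doc.createElement(k)
--         tmp_text_node = doc.createTextNode(v)
--         tmp_node.appendChild(tmp_text_node)
--         argument_list.append(tmp_node)
--
--     # append the prepared argument nodes to the function element
--     for arg in argument_list: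
--         fn.appendChild(arg)
--
--     # append function element to the body element
--     body.appendChild(fn)
--
--     # append body element to envelope element
--     envelope.appendChild(body)
--
--     # append envelope element to document, making it the root element
--     doc.appendChild(envelope)
--
--     # our tree is ready, conver it to a string
--     return doc.toxml()
-- ===== SOURCE B (Python) =====
-- def createTCPPortDocument(ip, port, description):
--     # direct string assembly of the same document (same escaping rules as minidom's text serializer)
--     def esc(s):
--         return s.replace('&', '&amp;').replace('<', '&lt;').replace('"', '&quot;').replace('>', '&gt;')
--     p = str(port)
--     args = [('NewExternalPort', p),
--             ('NewProtocol', 'TCP'),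
--             ('NewInternalPort', p),
--             ('NewInternalClient', ip),
--             ('NewEnabled', '1'),
--             ('NewPortMappingDescription', description),
--             ('NewLeaseDuration', '0')]
--     inner = ''.join('<{0}>{1}</{0}>'.format(k, esc(v)) for k, v in args)
--     return ('<?xml version="1.0" ?>'
--             '<s:Envelope xmlns:s="http://schemas.xmlsoap.org/soap/envelope/"'
--             ' s:encodingStyle="http://schemas.xmlsoap.org/soap/encoding/">'
--             '<s:Body>'
--             '<u:AddPortMapping xmlns:u="urn:schemas-upnp-org:service:WANIPConnection:1">'
--             + inner +
--             '</u:AddPortMapping></s:Body></s:Envelope>')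
-- ===== Notes on version B (the rewrite author's own statement) =====
-- stated objective: simpler
-- what changed: B drops the minidom DOM entirely (no Document/node objects, no appendChild loops) and assembles the XML by string concatenation: the seven argument elements are formatted and joined in one pass and wrapped in literal envelope/body/function strings, with a four-character escape for text values matching minidom's serializer.
import Mathlib
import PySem

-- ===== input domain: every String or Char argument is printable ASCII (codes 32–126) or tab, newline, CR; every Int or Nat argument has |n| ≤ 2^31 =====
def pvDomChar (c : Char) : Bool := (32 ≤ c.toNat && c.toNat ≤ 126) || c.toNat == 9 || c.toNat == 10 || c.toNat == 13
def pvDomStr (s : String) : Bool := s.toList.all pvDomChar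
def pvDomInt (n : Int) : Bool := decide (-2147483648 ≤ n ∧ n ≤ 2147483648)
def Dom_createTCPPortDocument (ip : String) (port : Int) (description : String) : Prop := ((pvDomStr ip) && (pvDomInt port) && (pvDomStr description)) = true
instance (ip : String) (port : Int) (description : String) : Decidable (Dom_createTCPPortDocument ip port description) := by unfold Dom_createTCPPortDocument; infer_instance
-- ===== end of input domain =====

-- B replaces the minidom DOM construction with direct string assembly (simpler, no node objects).


-- ===== PORT A =====
-- PySem has no xml.dom.minidom; the DOM nodes and minidom's writexml serializer are
-- modelled by hand, exact for the element/text shapes A builds: a text node is escaped by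
-- minidom's _write_data (& < " > in that replace order), an element is written as
-- <name attrs…>children</name>, and toxml prepends the '<?xml version="1.0" ?>' declaration.
def pvWriteData (s : String) : String :=
  PySem.Str.replace (PySem.Str.replace (PySem.Str.replace (PySem.Str.replace s "&" "&amp;") "<" "&lt;") "\"" "&quot;") ">" "&gt;"

-- minidom writexml for an element whose children are already serialized to `inner`
def pvElemXml (name : String) (attrs : List (String × String)) (inner : String) : String :=
  "<" ++ name ++ attrs.foldl (fun acc a => acc ++ " " ++ a.1 ++ "=\"" ++ pvWriteData a.2 ++ "\"") "" ++ ">" ++ inner ++ "</" ++ name ++ ">"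

-- an argument element containing one text node, as A builds in its first loop
def pvArgNodeXml (kv : String × String) : String :=
  "<" ++ kv.1 ++ ">" ++ pvWriteData kv.2 ++ "</" ++ kv.1 ++ ">"

def createTCPPortDocument (ip : String) (port : Int) (description : String) : String :=
  let envelopeAttrs : List (String × String) :=
    [("xmlns:s", "http://schemas.xmlsoap.org/soap/envelope/"),
     ("s:encodingStyle", "http://schemas.xmlsoap.org/soap/encoding/")]
  let fnAttrs : List (String × String) :=
    [("xmlns:u", "urn:schemas-upnp-org:service:WANIPConnection:1")]
  let arguments : List (String × String) :=
    [("NewExternalPort", PySem.Int.toStr port),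
     ("NewProtocol", "TCP"),
     ("NewInternalPort", PySem.Int.toStr port),
     ("NewInternalClient", ip),
     ("NewEnabled", "1"),
     ("NewPortMappingDescription", description),
     ("NewLeaseDuration", "0")]
  -- first loop: build the argument nodes into argument_list
  let argumentList : List (String × String) :=
    arguments.foldl (fun acc kv => acc ++ [kv]) []
  -- second loop: append each argument node to fn (serialized children accumulate in order)
  let fnInner : String := argumentList.foldl (fun acc kv => acc ++ pvArgNodeXml kv) ""
  let fnXml : String := pvElemXml "u:AddPortMapping" fnAttrs fnInner
  let bodyXml : String := pvElemXml "s:Body" [] fnXml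
  let envelopeXml : String := pvElemXml "s:Envelope" envelopeAttrs bodyXml
  "<?xml version=\"1.0\" ?>" ++ envelopeXml

-- ===== PORT B =====
def pvEsc (s : String) : String :=
  PySem.Str.replace (PySem.Str.replace (PySem.Str.replace (PySem.Str.replace s "&" "&amp;") "<" "&lt;") "\"" "&quot;") ">" "&gt;"

def createTCPPortDocument_alt (ip : String) (port : Int) (description : String) : String :=
  let p := PySem.Int.toStr port
  let args : List (String × String) :=
    [("NewExternalPort", p),
     ("NewProtocol", "TCP"),
     ("NewInternalPort", p),
     ("NewInternalClient", ip),
     ("NewEnabled", "1"),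
     ("NewPortMappingDescription", description),
     ("NewLeaseDuration", "0")]
  let inner := PySem.Str.join "" (args.map (fun kv => "<" ++ kv.1 ++ ">" ++ pvEsc kv.2 ++ "</" ++ kv.1 ++ ">"))
  "<?xml version=\"1.0\" ?><s:Envelope xmlns:s=\"http://schemas.xmlsoap.org/soap/envelope/\" s:encodingStyle=\"http://schemas.xmlsoap.org/soap/encoding/\"><s:Body><u:AddPortMapping xmlns:u=\"urn:schemas-upnp-org:service:WANIPConnection:1\">"
    ++ inner ++ "</u:AddPortMapping></s:Body></s:Envelope>"

-- ===== PRECONDITION & SPEC =====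
def Spec_createTCPPortDocument (ip : String) (port : Int) (description : String) (out : String) : Prop := out = createTCPPortDocument_alt ip port description
instance (ip : String) (port : Int) (description : String) (out : String) : Decidable (Spec_createTCPPortDocument ip port description out) := by unfold Spec_createTCPPortDocument; infer_instance

-- ===== CLAIM (what is proved, stated in full; the proofs are below) =====
def Claim_equal_createTCPPortDocument : Prop := ∀ (ip : String) (port : Int) (description : String), Dom_createTCPPortDocument ip port description → Spec_createTCPPortDocument ip port description (createTCPPortDocument ip port description)

-- ===== LEMMAS AND PROOFS =====

-- minidom's text escaping is the identity on the three constant attribute values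
lemma pvWriteData_attr1 : pvWriteData "http://schemas.xmlsoap.org/soap/envelope/" = "http://schemas.xmlsoap.org/soap/envelope/" := by decide
lemma pvWriteData_attr2 : pvWriteData "http://schemas.xmlsoap.org/soap/encoding/" = "http://schemas.xmlsoap.org/soap/encoding/" := by decide
lemma pvWriteData_attr3 : pvWriteData "urn:schemas-upnp-org:service:WANIPConnection:1" = "urn:schemas-upnp-org:service:WANIPConnection:1" := by decide

-- ===== VERDICT (by name: the statement is the Claim_ definition above) =====
set_option maxRecDepth 8192 in
set_option maxHeartbeats 2000000 in
theorem createTCPPortDocument_spec : Claim_equal_createTCPPortDocument := by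
  intro ip port description _
  show _ = _
  simp only [createTCPPortDocument, createTCPPortDocument_alt, pvElemXml, pvArgNodeXml,
    List.foldl, List.map, PySem.Str.join, pvWriteData_attr1, pvWriteData_attr2, pvWriteData_attr3]
  simp only [pvWriteData, pvEsc]
  apply String.toList_injective
  simp only [String.toList_append, PySem.Str.toList_replace,
    PySem.Int.toList_toStr, List.append_assoc, List.cons_append, List.nil_append, List.foldl]
  simp [PySem.Chars.join, List.intercalate, List.intersperse, List.flatten, List.append_assoc, List.cons_append]
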